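-- pv_equiv track=rewrite | github.com/pterodragon/programming | C++/codeforces/Elongated_Matrix/temp.py | max_list_subsume_set
-- ===== SOURCE A (Python) =====
-- def subsumes(r1, r2):  # r1 subsumes r2
--     a, b = r1
--     c, d = r2
--     return a <= c and b >= d
--
-- def max_list_subsumes(ls1, ls2):
--     # all segs of ls1 subsumes at least 1 of ls2
--     return all(any(subsumes(r1, r2) for r2 in ls2) for r1 in ls1)
--
-- def max_list_subsume_set(ls):
--     s = []
--     for r1 in ls:
--         if any(max_list_subsumes(r2, r1) for r2 in s):
--             continue
--         s = [r2 for r2 in s if not max_list_subsumes(r1, r2)]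
--         s.append(r1)
--     return s
-- ===== SOURCE B (Python) =====
-- def subsumes(r1, r2):  # r1 subsumes r2
--     a, b = r1
--     c, d = r2
--     return a <= c and b >= d
--
-- def max_list_subsumes(ls1, ls2):
--     # all segs of ls1 subsumes at least 1 of ls2
--     return all(any(subsumes(r1, r2) for r2 in ls2) for r1 in ls1)
--
-- def max_list_subsume_set(ls):
--     # No mutated frontier: one element-wise keep test against the already-seen
--     # prefix (any subsumer drops x) and the remaining suffix (only a strict
--     # dominator drops x), appended in original order.
--     res = []
--     pre = []
--     rest = list(ls)
--     while rest:
--         x = rest.pop(0)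
--         if all(not max_list_subsumes(y, x) for y in pre) and \
--            all(not (max_list_subsumes(y, x) and not max_list_subsumes(x, y)) for y in rest):
--             res.append(x)
--         pre.append(x)
--     return res
-- ===== Notes on version B (the rewrite author's own statement) =====
-- stated objective: alternative
-- what changed: Replaces A's mutated frontier (skip if subsumed, then prune the frontier and append) by a per-element keep test: x is kept iff no element of the already-seen prefix subsumes it and no element of the remaining suffix strictly subsumes it, appended in original order.
import Mathlib
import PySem

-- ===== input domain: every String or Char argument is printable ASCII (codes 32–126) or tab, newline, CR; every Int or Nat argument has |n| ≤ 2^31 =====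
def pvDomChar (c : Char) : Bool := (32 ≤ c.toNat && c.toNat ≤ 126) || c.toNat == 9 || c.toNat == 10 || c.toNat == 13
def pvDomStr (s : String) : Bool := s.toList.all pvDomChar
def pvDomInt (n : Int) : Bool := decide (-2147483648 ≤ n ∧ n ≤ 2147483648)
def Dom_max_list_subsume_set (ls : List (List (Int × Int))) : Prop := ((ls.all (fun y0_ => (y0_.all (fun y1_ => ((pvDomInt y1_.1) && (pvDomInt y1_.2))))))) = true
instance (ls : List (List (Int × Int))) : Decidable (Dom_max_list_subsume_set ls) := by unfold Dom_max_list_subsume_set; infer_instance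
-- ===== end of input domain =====

-- B replaces A's mutated frontier by a per-element keep test against the seen prefix and remaining suffix (alternative decomposition, same result).


-- ===== PORT A =====
def subsumesB (r1 r2 : Int × Int) : Bool := decide (r1.1 ≤ r2.1) && decide (r1.2 ≥ r2.2)

def max_list_subsumes (ls1 ls2 : List (Int × Int)) : Bool :=
  ls1.all (fun r1 => ls2.any (fun r2 => subsumesB r1 r2))

def max_list_subsume_set (ls : List (List (Int × Int))) : List (List (Int × Int)) :=
  ls.foldl (fun s r1 =>
    if s.any (fun r2 => max_list_subsumes r2 r1) then s
    else (s.filter (fun r2 => !(max_list_subsumes r1 r2))) ++ [r1]) []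

-- ===== PORT B =====
-- keep test of Source B: no subsumer in the seen prefix, no strict dominator in the rest
def keepB (pre : List (List (Int × Int))) (x : List (Int × Int))
    (rest : List (List (Int × Int))) : Bool :=
  pre.all (fun y => !(max_list_subsumes y x)) &&
  rest.all (fun y => !(max_list_subsumes y x && !(max_list_subsumes x y)))

-- the while loop of Source B: state (pre, res), structural recursion on rest
def selGo (pre res : List (List (Int × Int))) : List (List (Int × Int)) → List (List (Int × Int))
  | [] => res
  | x :: rest => selGo (pre ++ [x]) (res ++ (if keepB pre x rest then [x] else [])) rest

def max_list_subsume_set_alt (ls : List (List (Int × Int))) : List (List (Int × Int)) :=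
  selGo [] [] ls

-- ===== PRECONDITION & SPEC =====
def Spec_max_list_subsume_set (ls : List (List (Int × Int))) (out : List (List (Int × Int))) : Prop := out = max_list_subsume_set_alt ls
instance (ls : List (List (Int × Int))) (out : List (List (Int × Int))) : Decidable (Spec_max_list_subsume_set ls out) := by unfold Spec_max_list_subsume_set; infer_instance

-- ===== CLAIM (what is proved, stated in full; the proofs are below) =====
def Claim_equal_max_list_subsume_set : Prop := ∀ (ls : List (List (Int × Int))), Dom_max_list_subsume_set ls → Spec_max_list_subsume_set ls (max_list_subsume_set ls)

-- ===== LEMMAS AND PROOFS =====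

-- non-tail-recursive form of selGo, convenient for the proofs
def sel (pre : List (List (Int × Int))) : List (List (Int × Int)) → List (List (Int × Int))
  | [] => []
  | x :: rest => (if keepB pre x rest then [x] else []) ++ sel (pre ++ [x]) rest

lemma selGo_eq_sel (l pre res : List (List (Int × Int))) :
    selGo pre res l = res ++ sel pre l := by
  induction l generalizing pre res with
  | nil => simp [selGo, sel]
  | cons x rest ih => simp [selGo, sel, ih]

lemma Rm_refl (x : List (Int × Int)) : max_list_subsumes x x = true := by
  simp only [max_list_subsumes, List.all_eq_true]
  intro r hr
  exact List.any_eq_true.2 ⟨r, hr, by simp [subsumesB]⟩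

lemma Rm_trans {a b c : List (Int × Int)} (h1 : max_list_subsumes a b = true)
    (h2 : max_list_subsumes b c = true) : max_list_subsumes a c = true := by
  simp only [max_list_subsumes, List.all_eq_true, List.any_eq_true] at *
  intro r hr
  obtain ⟨s, hs, hrs⟩ := h1 r hr
  obtain ⟨t, ht, hst⟩ := h2 s hs
  refine ⟨t, ht, ?_⟩
  simp only [subsumesB, Bool.and_eq_true, decide_eq_true_eq] at *
  exact ⟨le_trans hrs.1 hst.1, le_trans hst.2 hrs.2⟩

lemma keepB_append (pre : List (List (Int × Int))) (x z : List (Int × Int))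
    (r : List (List (Int × Int))) :
    keepB pre x (r ++ [z]) =
      (keepB pre x r && !(max_list_subsumes z x && !(max_list_subsumes x z))) := by
  simp [keepB, List.all_append, Bool.and_assoc]

lemma sel_append (l : List (List (Int × Int))) (z : List (Int × Int)) :
    ∀ pre, sel pre (l ++ [z]) =
      (sel pre l).filter (fun y => !(max_list_subsumes z y && !(max_list_subsumes y z))) ++
      (if (pre ++ l).all (fun y => !(max_list_subsumes y z)) then [z] else []) := by
  induction l with
  | nil => intro pre; simp [sel, keepB]
  | cons a r ih =>
      intro pre
      show (if keepB pre a (r ++ [z]) then [a] else []) ++ sel (pre ++ [a]) (r ++ [z]) = _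
      rw [keepB_append, ih (pre ++ [a])]
      simp only [sel, List.filter_append, List.append_assoc, List.singleton_append]
      congr 1
      by_cases hk : keepB pre a r <;> simp [hk, List.filter_singleton]

lemma sel_subset : ∀ (l pre : List (List (Int × Int))) (x : List (Int × Int)),
    x ∈ sel pre l → x ∈ l := by
  intro l
  induction l with
  | nil => intro pre x hx; simp [sel] at hx
  | cons a r ih =>
      intro pre x hx
      by_cases hk : keepB pre a r <;> simp [sel, hk] at hx
      · rcases hx with hx | hx
        · simp [hx]
        · exact List.mem_cons_of_mem _ (ih _ _ hx)
      · exact List.mem_cons_of_mem _ (ih _ _ hx)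

lemma mem_sel_before : ∀ (l pre : List (List (Int × Int))) (y : List (Int × Int)),
    y ∈ sel pre l → ∀ w ∈ pre, max_list_subsumes w y = false := by
  intro l
  induction l with
  | nil => intro pre y hy; simp [sel] at hy
  | cons a r ih =>
      intro pre y hy w hw
      by_cases hk : keepB pre a r <;> simp [sel, hk] at hy
      · rcases hy with hy | hy
        · subst hy
          have := (Bool.and_eq_true .. ▸ hk).1
          simp only [List.all_eq_true, Bool.not_eq_true'] at this
          exact this w hw
        · exact ih _ _ hy w (List.mem_append_left _ hw)
      · exact ih _ _ hy w (List.mem_append_left _ hw)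

lemma sel_comp : ∀ (l pre : List (List (Int × Int))) (x y : List (Int × Int)),
    x ∈ sel pre l → y ∈ sel pre l → max_list_subsumes x y = true → x = y := by
  intro l
  induction l with
  | nil => intro pre x y hx; simp [sel] at hx
  | cons a r ih =>
      intro pre x y hx hy hR
      by_cases hk : keepB pre a r <;> simp [sel, hk] at hx hy
      · rcases hx with hx | hx <;> rcases hy with hy | hy
        · rw [hx, hy]
        · subst hx
          have := mem_sel_before _ _ _ hy x (by simp)
          rw [this] at hR; exact absurd hR (by simp)
        · subst hy
          have h1 : max_list_subsumes y x = false :=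
            mem_sel_before _ _ _ hx y (by simp)
          have h2 := (Bool.and_eq_true .. ▸ hk).2
          simp only [List.all_eq_true] at h2
          have h3 := h2 x (sel_subset _ _ _ hx)
          rw [hR, h1] at h3
          simp at h3
        · exact ih _ _ _ hx hy hR
      · exact ih _ _ _ hx hy hR

lemma sel_main : ∀ (ls : List (List (Int × Int))),
    max_list_subsume_set ls = sel [] ls ∧
    ∀ y ∈ ls, ∃ x ∈ sel [] ls, max_list_subsumes x y = true := by
  intro ls
  induction ls using List.reverseRecOn with
  | nil => simp [max_list_subsume_set, sel]
  | append_singleton pre z ih =>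
      obtain ⟨hA, hInv⟩ := ih
      have hstep : max_list_subsume_set (pre ++ [z]) =
          (if (sel [] pre).any (fun r2 => max_list_subsumes r2 z) then sel [] pre
           else ((sel [] pre).filter (fun r2 => !(max_list_subsumes z r2))) ++ [z]) := by
        have h1 : max_list_subsume_set (pre ++ [z]) =
            (fun s r1 => if s.any (fun r2 => max_list_subsumes r2 r1) then s
             else (s.filter (fun r2 => !(max_list_subsumes r1 r2))) ++ [r1])
              (max_list_subsume_set pre) z := by
          simp [max_list_subsume_set, List.foldl_append]
        rw [h1, hA]
      have hsel := sel_append pre z []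
      simp only [List.nil_append] at hsel
      by_cases h : (sel [] pre).any (fun r2 => max_list_subsumes r2 z)
      · obtain ⟨x, hxs, hxz⟩ := List.any_eq_true.1 h
        have hall : (pre.all fun y => !max_list_subsumes y z) = false := by
          apply List.all_eq_false.2
          exact ⟨x, sel_subset _ _ _ hxs, by simp [hxz]⟩
        have hfilt : (sel [] pre).filter
            (fun y => !(max_list_subsumes z y && !max_list_subsumes y z)) = sel [] pre := by
          apply List.filter_eq_self.2
          intro y hys
          by_cases hzy : max_list_subsumes z y
          · have hxy : max_list_subsumes x y = true := Rm_trans hxz hzy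
            have hxey : x = y := sel_comp _ _ _ _ hxs hys hxy
            subst hxey
            simp [hzy, hxz]
          · simp [hzy]
        have hsame : sel [] (pre ++ [z]) = sel [] pre := by
          rw [hsel, hfilt]; simp [hall]
        refine ⟨by rw [hstep, if_pos h, hsame], ?_⟩
        intro y hy
        rw [hsame]
        rcases List.mem_append.1 hy with hy | hy
        · exact hInv y hy
        · simp only [List.mem_singleton] at hy
          exact ⟨x, hxs, hy ▸ hxz⟩
      · have hall : (pre.all fun y => !max_list_subsumes y z) = true := by
          apply List.all_eq_true.2
          intro y hy
          simp only [Bool.not_eq_true']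
          by_contra hyz
          rw [Bool.not_eq_false] at hyz
          obtain ⟨x, hxs, hxy⟩ := hInv y hy
          have := List.any_eq_false.1 (Bool.not_eq_true _ ▸ h) x hxs
          rw [Rm_trans hxy hyz] at this
          simp at this
        have hfilt : (sel [] pre).filter
            (fun y => !(max_list_subsumes z y && !max_list_subsumes y z)) =
            (sel [] pre).filter (fun y => !(max_list_subsumes z y)) := by
          apply List.filter_congr
          intro y hys
          have hyz : max_list_subsumes y z = false := by
            have := List.all_eq_true.1 hall y (sel_subset _ _ _ hys)
            simpa using this
          simp [hyz]
        have hsame : sel [] (pre ++ [z]) =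
            (sel [] pre).filter (fun y => !(max_list_subsumes z y)) ++ [z] := by
          rw [hsel, hfilt]; simp [hall]
        refine ⟨by rw [hstep, if_neg (by simp [h]), hsame], ?_⟩
        intro y hy
        rcases List.mem_append.1 hy with hy | hy
        · obtain ⟨x, hxs, hxy⟩ := hInv y hy
          by_cases hzx : max_list_subsumes z x
          · exact ⟨z, by rw [hsame]; simp, Rm_trans hzx hxy⟩
          · refine ⟨x, ?_, hxy⟩
            rw [hsame]
            exact List.mem_append_left _ (List.mem_filter.2 ⟨hxs, by simp [hzx]⟩)
        · simp only [List.mem_singleton] at hy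
          subst hy
          exact ⟨y, by rw [hsame]; simp, Rm_refl y⟩

-- ===== VERDICT (by name: the statement is the Claim_ definition above) =====
theorem max_list_subsume_set_spec : Claim_equal_max_list_subsume_set := by
  intro ls _
  show max_list_subsume_set ls = max_list_subsume_set_alt ls
  rw [max_list_subsume_set_alt, selGo_eq_sel, List.nil_append]
  exact (sel_main ls).1
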